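-- pv_equiv track=rewrite | github.com/flycatcher/relue-tcejorp | p088/src/solution.py | sieve_factors
-- ===== SOURCE A (Python) =====
-- def sieve_factors(limit):
--     result = []
--     for x in range(limit):
--         result.append([])
--     for x in range(2, limit):
--         for y in range(x << 1, limit, x):
--             result[y].append(x)
--     return result
-- ===== SOURCE B (Python) =====
-- def sieve_factors(limit):
--     # Per-number divisor pairing: scan d up to sqrt(n); each hit d yields its
--     # cofactor n // d, so each row is built independently, with no cross-off table.
--     out = []
--     for n in range(limit):
--         small = []
--         large = []
--         d = 2
--         while d * d <= n:
--             if n % d == 0: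
--                 small.append(d)
--                 q = n // d
--                 if q != d:
--                     large.append(q)
--             d += 1
--         out.append(small + large[::-1])
--     return out
-- ===== Notes on version B (the rewrite author's own statement) =====
-- stated objective: alternative
-- what changed: Replaces the two-phase sieve (preallocate a table of empty lists, then cross off multiples of each x by mutating table entries) with independent per-number divisor pairing: scan d up to sqrt(n), collect each hit d and its cofactor n//d, and append the reversed cofactors; no shared mutable table.
import Mathlib
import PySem

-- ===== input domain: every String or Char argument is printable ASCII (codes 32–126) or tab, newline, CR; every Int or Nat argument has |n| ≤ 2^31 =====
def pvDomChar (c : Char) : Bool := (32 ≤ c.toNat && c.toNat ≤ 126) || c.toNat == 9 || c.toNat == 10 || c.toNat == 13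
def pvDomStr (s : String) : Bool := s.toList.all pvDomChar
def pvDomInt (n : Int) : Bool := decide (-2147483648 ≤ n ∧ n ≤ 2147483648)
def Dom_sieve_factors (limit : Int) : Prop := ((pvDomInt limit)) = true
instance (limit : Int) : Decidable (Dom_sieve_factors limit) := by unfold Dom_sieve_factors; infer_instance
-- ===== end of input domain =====

-- B replaces A's mutable sieve cross-off table by independent per-number divisor pairing (scan d up to sqrt(n), emit d and its cofactor n//d); alternative structure, not claimed faster.

-- ===== PORT A =====
-- result[y].append(x): y satisfies 0 ≤ 4 ≤ 2*x ≤ y < limit = length result, so the list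
-- index is always in range and List.modify at y.toNat is exact (Python never raises here).
def sieve_factors (limit : Int) : List (List Int) :=
  let result : List (List Int) :=
    (PySem.List.pyRange 0 limit 1).foldl (fun acc _ => acc ++ [([] : List Int)]) []
  (PySem.List.pyRange 2 limit 1).foldl
    (fun res (x : Int) =>
      (PySem.List.pyRange (x <<< (1 : Nat)) limit x).foldl
        (fun res y => res.modify y.toNat (fun l => l ++ [x])) res)
    result

-- ===== PORT B =====
-- the 'while d * d <= n' loop of Source B (terminates since d increases toward sqrt n)
def pvPairLoop (n d : Int) (small large : List Int) : List Int × List Int :=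
  if h : d * d ≤ n then
    if PySem.Int.mod n d == 0 then
      let q := PySem.Int.floordiv n d
      if q != d then
        pvPairLoop n (d + 1) (small ++ [d]) (large ++ [q])
      else
        pvPairLoop n (d + 1) (small ++ [d]) large
    else
      pvPairLoop n (d + 1) small large
  else
    (small, large)
termination_by (n + 1 - d).toNat
decreasing_by
  all_goals
    (have h2 : d ≤ d * d := by
      rcases Int.lt_or_le d 1 with h1 | h1
      · nlinarith [mul_self_nonneg d]
      · nlinarith
     omega)


-- large[::-1] is ported as List.reverse (exact: a [::-1] slice is the reversed list)
def sieve_factors_alt (limit : Int) : List (List Int) :=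
  (PySem.List.pyRange 0 limit 1).foldl
    (fun out n =>
      let sl := pvPairLoop n 2 [] []
      out ++ [sl.1 ++ sl.2.reverse]) []

-- ===== PRECONDITION & SPEC =====
def Spec_sieve_factors (limit : Int) (out : List (List Int)) : Prop := out = sieve_factors_alt limit
instance (limit : Int) (out : List (List Int)) : Decidable (Spec_sieve_factors limit out) := by unfold Spec_sieve_factors; infer_instance

-- ===== CLAIM (what is proved, stated in full; the proofs are below) =====
def Claim_equal_sieve_factors : Prop := ∀ (limit : Int), Dom_sieve_factors limit → Spec_sieve_factors limit (sieve_factors limit)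

-- ===== LEMMAS AND PROOFS =====

-- A pyRange with positive step has no duplicates.
theorem pv_nodup_pyRange_pos (a b s : Int) (hs : 0 < s) : (PySem.List.pyRange a b s).Nodup := by
  rw [PySem.List.pyRange_of_pos a b hs]
  refine List.Nodup.map ?_ (List.nodup_range)
  intro p q h
  dsimp only at h
  have h2 : s * (p : Int) = s * (q : Int) := by omega
  have := mul_left_cancel₀ (by omega : (s:Int) ≠ 0) h2
  exact_mod_cast this

-- modifying entry z of a range-indexed table changes the value at z only.
theorem pv_modify_map_range (limit z : Int) (g : Int → List Int) (f : List Int → List Int)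
    (h0 : 0 ≤ z) (_h1 : z < limit) :
    ((PySem.List.pyRange 0 limit 1).map g).modify z.toNat f
      = (PySem.List.pyRange 0 limit 1).map (fun y => if y = z then f (g y) else g y) := by
  apply List.ext_getElem
  · simp [List.length_modify]
  · intro j hj hj'
    simp only [List.length_modify, List.length_map, PySem.List.length_pyRange_one] at hj hj'
    rw [List.getElem_modify]
    simp only [List.getElem_map, PySem.List.getElem_pyRange_one]
    by_cases hz : ((j : Int)) = z
    · have hz' : z.toNat = j := by omega
      simp [hz, hz']
    · have hz' : ¬ z.toNat = j := by omega
      simp [hz, hz']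

-- the inner cross-off loop: each y in the (duplicate-free, in-range) list ys gets x appended.
theorem pv_inner_loop (limit x : Int) (ys : List Int) (g : Int → List Int)
    (hnd : ys.Nodup) (hmem : ∀ y ∈ ys, 0 ≤ y ∧ y < limit) :
    ys.foldl (fun res y => res.modify y.toNat (fun l => l ++ [x]))
        ((PySem.List.pyRange 0 limit 1).map g)
      = (PySem.List.pyRange 0 limit 1).map
          (fun y => if y ∈ ys then g y ++ [x] else g y) := by
  induction ys generalizing g with
  | nil => simp
  | cons z t ih =>
    have hz := hmem z (by simp)
    have hnt : t.Nodup := hnd.of_cons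
    have hznt : z ∉ t := by simp at hnd; exact hnd.1
    simp only [List.foldl_cons]
    rw [pv_modify_map_range limit z g _ hz.1 hz.2]
    rw [ih _ hnt (fun y hy => hmem y (by simp [hy]))]
    apply List.map_congr_left
    intro y _
    by_cases h1 : y = z
    · subst h1
      simp [hznt]
    · by_cases h2 : y ∈ t <;> simp [h1, h2]

-- the outer loop over candidate factors x: entry y collects, in order, every x whose
-- cross-off range hits y.
theorem pv_outer_loop (limit : Int) (xs : List Int) (g : Int → List Int)
    (hxs : ∀ x ∈ xs, 2 ≤ x) :
    xs.foldl
        (fun res (x : Int) =>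
          (PySem.List.pyRange (x <<< (1 : Nat)) limit x).foldl
            (fun res y => res.modify y.toNat (fun l => l ++ [x])) res)
        ((PySem.List.pyRange 0 limit 1).map g)
      = (PySem.List.pyRange 0 limit 1).map
          (fun y => g y ++ xs.filter
            (fun x : Int => decide (y ∈ PySem.List.pyRange (x <<< (1 : Nat)) limit x))) := by
  induction xs generalizing g with
  | nil => simp
  | cons x t ih =>
    have hx : 2 ≤ x := hxs x (by simp)
    have hxpos : (0 : Int) < x := by omega
    simp only [List.foldl_cons]
    rw [pv_inner_loop limit x _ g (pv_nodup_pyRange_pos _ _ _ hxpos)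
      (by
        intro y hy
        have := (PySem.List.mem_pyRange_iff_of_pos hxpos y).1 hy
        rw [Int.shiftLeft_eq] at this
        constructor <;> omega)]
    rw [ih _ (fun x hx => hxs x (by simp [hx]))]
    apply List.map_congr_left
    intro y _
    by_cases h : y ∈ PySem.List.pyRange (x <<< (1 : Nat)) limit x <;>
      simp [h]

-- pointwise: the factors collected for y by the sieve are exactly the trial divisors of y.
theorem pv_pointwise (limit y : Int) (hy0 : 0 ≤ y) (hy1 : y < limit) :
    (PySem.List.pyRange 2 limit 1).filter
        (fun x : Int => decide (y ∈ PySem.List.pyRange (x <<< (1 : Nat)) limit x))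
      = (PySem.List.pyRange 2 y 1).filter (fun d => PySem.Int.mod y d == 0) := by
  by_cases hy2 : y < 2
  · rw [PySem.List.pyRange_one_eq_nil (by omega : y ≤ 2)]
    simp only [List.filter_nil]
    rw [List.filter_eq_nil_iff]
    intro x hx
    have hx2 : 2 ≤ x ∧ x < limit := by
      have := (PySem.List.mem_pyRange_one).1 hx; exact this
    simp only [decide_eq_true_eq]
    intro hmem
    have := (PySem.List.mem_pyRange_iff_of_pos (by omega : (0:Int) < x) y).1 hmem
    rw [Int.shiftLeft_eq] at this
    omega
  · push Not at hy2
    rw [PySem.List.pyRange_one_append 2 y limit hy2 (by omega), List.filter_append]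
    have h2 : (PySem.List.pyRange y limit 1).filter
        (fun x : Int => decide (y ∈ PySem.List.pyRange (x <<< (1 : Nat)) limit x)) = [] := by
      rw [List.filter_eq_nil_iff]
      intro x hx
      have hx2 : y ≤ x ∧ x < limit := (PySem.List.mem_pyRange_one).1 hx
      simp only [decide_eq_true_eq]
      intro hmem
      have := (PySem.List.mem_pyRange_iff_of_pos (by omega : (0:Int) < x) y).1 hmem
      rw [Int.shiftLeft_eq] at this
      omega
    rw [h2, List.append_nil]
    apply List.filter_congr
    intro x hx
    have hx2 : 2 ≤ x ∧ x < y := (PySem.List.mem_pyRange_one).1 hx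
    have hxpos : (0 : Int) < x := by omega
    have hdvd := PySem.Int.mod_eq_zero_iff_dvd y x
    show decide (y ∈ PySem.List.pyRange (x <<< (1 : Nat)) limit x) = (PySem.Int.mod y x == 0)
    rw [Bool.eq_iff_iff, decide_eq_true_iff, beq_iff_eq, hdvd]
    constructor
    · intro hmem
      have := (PySem.List.mem_pyRange_iff_of_pos hxpos y).1 hmem
      rw [Int.shiftLeft_eq] at this
      have h' : x ∣ x * 2 ^ 1 := Dvd.intro _ rfl
      have h'' : x ∣ y - x * 2 ^ 1 := this.2.2
      simpa using dvd_add h'' h'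
    · intro hdv
      rw [PySem.List.mem_pyRange_iff_of_pos hxpos, Int.shiftLeft_eq]
      refine ⟨?_, by omega, ?_⟩
      · rcases hdv with ⟨k, hk⟩
        have hk2 : 2 ≤ k := by nlinarith
        nlinarith
      · exact dvd_sub hdv (Dvd.intro _ rfl)

-- ===== B-SIDE LEMMAS =====

theorem pv_cof_ge (n e d : Int) (he : e ∣ n) (hepos : 0 < e) (hde : d * e ≤ n)
    (hne : e * d ≠ n) : (d + 1) * e ≤ n := by
  obtain ⟨k, hk⟩ := he
  have hdk : d ≤ k := by nlinarith
  have hk2 : d + 1 ≤ k := by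
    rcases eq_or_lt_of_le hdk with h | h
    · exact absurd (by rw [hk, ← h]) hne
    · omega
  nlinarith

theorem pv_loop_spec (n d : Int) (s l : List Int) (hd : 2 ≤ d) :
    (pvPairLoop n d s l).1 ++ (pvPairLoop n d s l).2.reverse
      = s ++ (PySem.List.pyRange d n 1).filter (fun e => decide (e ∣ n ∧ d * e ≤ n))
          ++ l.reverse := by
  revert hd
  induction d, s, l using pvPairLoop.induct (n := n) with
  | case1 d s l hdd hmod q hq ih =>
    intro hd
    have hd0 : (0:Int) < d := by omega
    have hdvd : d ∣ n := (PySem.Int.mod_eq_zero_iff_dvd n d).1 (by simpa using hmod)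
    have hqq : q = PySem.Int.floordiv n d := rfl
    have hq' : q ≠ d := by simpa using hq
    have hnq : d * q = n := by
      rw [hqq, PySem.Int.floordiv_eq_ediv_of_pos hd0]
      exact Int.mul_ediv_cancel' hdvd
    have hdq : d ≤ q := le_of_mul_le_mul_left (by nlinarith) hd0
    have hq1 : d + 1 ≤ q := by omega
    have hqn : q < n := by nlinarith
    have hdn : d < n := by nlinarith
    rw [pvPairLoop, dif_pos hdd, if_pos hmod]
    simp only []
    rw [if_pos hq]
    rw [ih (by omega)]
    have hsplit : (PySem.List.pyRange d n 1).filter (fun e => decide (e ∣ n ∧ d * e ≤ n))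
        = [d] ++ (PySem.List.pyRange (d+1) q 1).filter (fun e => decide (e ∣ n ∧ d * e ≤ n)) ++ [q] := by
      rw [PySem.List.pyRange_one_cons hdn,
          PySem.List.pyRange_one_append (d+1) q n hq1 (by omega),
          PySem.List.pyRange_one_cons hqn]
      rw [List.filter_cons, List.filter_append, List.filter_cons]
      have h1 : (decide (d ∣ n ∧ d * d ≤ n)) = true := by simp [hdvd, hdd]
      have h2 : (decide (q ∣ n ∧ d * q ≤ n)) = true := by
        simp only [decide_eq_true_eq]
        exact ⟨⟨d, by linarith⟩, by omega⟩
      have h3 : (PySem.List.pyRange (q+1) n 1).filter (fun e => decide (e ∣ n ∧ d * e ≤ n)) = [] := by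
        rw [List.filter_eq_nil_iff]
        intro e hee
        have h4 := (PySem.List.mem_pyRange_one).1 hee
        simp only [decide_eq_true_eq, not_and]
        intro _
        nlinarith
      rw [h1, h3]
      simp [h2]
    have halt : (PySem.List.pyRange (d+1) n 1).filter (fun e => decide (e ∣ n ∧ (d+1) * e ≤ n))
        = (PySem.List.pyRange (d+1) q 1).filter (fun e => decide (e ∣ n ∧ d * e ≤ n)) := by
      rw [PySem.List.pyRange_one_append (d+1) q n hq1 (by omega), List.filter_append]
      have h5 : (PySem.List.pyRange q n 1).filter (fun e => decide (e ∣ n ∧ (d+1) * e ≤ n)) = [] := by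
        rw [List.filter_eq_nil_iff]
        intro e hee
        have h4 := (PySem.List.mem_pyRange_one).1 hee
        simp only [decide_eq_true_eq, not_and]
        intro _
        nlinarith
      rw [h5, List.append_nil]
      apply List.filter_congr
      intro e hee
      have h4 := (PySem.List.mem_pyRange_one).1 hee
      rw [Bool.eq_iff_iff, decide_eq_true_iff, decide_eq_true_iff]
      constructor
      · rintro ⟨he, hde⟩
        exact ⟨he, by nlinarith⟩
      · rintro ⟨he, hde⟩
        refine ⟨he, pv_cof_ge n e d he (by omega) hde ?_⟩
        intro habs
        have : e = q := by nlinarith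
        omega
    rw [hsplit, halt]
    simp
  | case2 d s l hdd hmod q hq ih =>
    intro hd
    have hd0 : (0:Int) < d := by omega
    have hdvd : d ∣ n := (PySem.Int.mod_eq_zero_iff_dvd n d).1 (by simpa using hmod)
    have hqq : q = PySem.Int.floordiv n d := rfl
    have hq' : q = d := by simpa using hq
    have hnq : d * d = n := by
      have h6 : d * q = n := by
        rw [hqq, PySem.Int.floordiv_eq_ediv_of_pos hd0]
        exact Int.mul_ediv_cancel' hdvd
      rw [hq'] at h6; exact h6
    have hdn : d < n := by nlinarith
    rw [pvPairLoop, dif_pos hdd, if_pos hmod]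
    simp only []
    rw [if_neg hq]
    rw [ih (by omega)]
    have hsplit : (PySem.List.pyRange d n 1).filter (fun e => decide (e ∣ n ∧ d * e ≤ n))
        = [d] ++ (PySem.List.pyRange (d+1) n 1).filter (fun e => decide (e ∣ n ∧ (d+1) * e ≤ n)) := by
      rw [PySem.List.pyRange_one_cons hdn, List.filter_cons]
      have h1 : (decide (d ∣ n ∧ d * d ≤ n)) = true := by simp [hdvd, hdd]
      have h2 : (PySem.List.pyRange (d+1) n 1).filter (fun e => decide (e ∣ n ∧ d * e ≤ n)) = [] := by
        rw [List.filter_eq_nil_iff]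
        intro e hee
        have h4 := (PySem.List.mem_pyRange_one).1 hee
        simp only [decide_eq_true_eq, not_and]
        intro _
        nlinarith
      have h3 : (PySem.List.pyRange (d+1) n 1).filter (fun e => decide (e ∣ n ∧ (d+1) * e ≤ n)) = [] := by
        rw [List.filter_eq_nil_iff]
        intro e hee
        have h4 := (PySem.List.mem_pyRange_one).1 hee
        simp only [decide_eq_true_eq, not_and]
        intro _
        nlinarith
      rw [h2, h3, h1]
      simp
    rw [hsplit]
    simp
  | case3 d s l hdd hmod ih =>
    intro hd
    have hd0 : (0:Int) < d := by omega
    have hdvd : ¬ d ∣ n := by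
      intro h
      exact hmod (by simp [(PySem.Int.mod_eq_zero_iff_dvd n d).2 h])
    have hdn : d < n := by nlinarith
    rw [pvPairLoop, dif_pos hdd, if_neg hmod]
    rw [ih (by omega)]
    have hsplit : (PySem.List.pyRange d n 1).filter (fun e => decide (e ∣ n ∧ d * e ≤ n))
        = (PySem.List.pyRange (d+1) n 1).filter (fun e => decide (e ∣ n ∧ (d+1) * e ≤ n)) := by
      rw [PySem.List.pyRange_one_cons hdn, List.filter_cons]
      have h1 : (decide (d ∣ n ∧ d * d ≤ n)) = false := by simp [hdvd]
      rw [h1]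
      simp only [Bool.false_eq_true, if_false]
      apply List.filter_congr
      intro e hee
      have h4 := (PySem.List.mem_pyRange_one).1 hee
      rw [Bool.eq_iff_iff, decide_eq_true_iff, decide_eq_true_iff]
      constructor
      · rintro ⟨he, hde⟩
        refine ⟨he, pv_cof_ge n e d he (by omega) hde ?_⟩
        intro habs
        exact hdvd ⟨e, by linarith⟩
      · rintro ⟨he, hde⟩
        exact ⟨he, by nlinarith⟩
    rw [hsplit]
  | case4 d s l hdd =>
    intro hd
    rw [pvPairLoop, dif_neg hdd]
    have h0 : (PySem.List.pyRange d n 1).filter (fun e => decide (e ∣ n ∧ d * e ≤ n)) = [] := by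
      rw [List.filter_eq_nil_iff]
      intro e hee
      have h1 := (PySem.List.mem_pyRange_one).1 hee
      simp only [decide_eq_true_eq, not_and]
      intro _ h3
      nlinarith
    rw [h0]
    simp

-- each row of B is exactly the ascending proper divisors >= 2 of n
theorem pv_row (n : Int) :
    (pvPairLoop n 2 [] []).1 ++ (pvPairLoop n 2 [] []).2.reverse
      = (PySem.List.pyRange 2 n 1).filter (fun e => PySem.Int.mod n e == 0) := by
  rw [pv_loop_spec n 2 [] [] (le_refl 2)]
  simp only [List.append_nil, List.nil_append, List.reverse_nil]
  apply List.filter_congr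
  intro e hee
  have h4 := (PySem.List.mem_pyRange_one).1 hee
  have hdvd := PySem.Int.mod_eq_zero_iff_dvd n e
  rw [Bool.eq_iff_iff, decide_eq_true_iff, beq_iff_eq, hdvd]
  constructor
  · rintro ⟨he, _⟩; exact he
  · intro he
    refine ⟨he, ?_⟩
    obtain ⟨k, hk⟩ := he
    have hk2 : 2 ≤ k := by nlinarith
    nlinarith

-- ===== VERDICT (by name: the statement is the Claim_ definition above) =====
theorem sieve_factors_spec : Claim_equal_sieve_factors := by
  intro limit _
  unfold Spec_sieve_factors
  have hA : sieve_factors limit = (PySem.List.pyRange 0 limit 1).map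
      (fun y => (PySem.List.pyRange 2 y 1).filter (fun d => PySem.Int.mod y d == 0)) := by
    unfold sieve_factors
    rw [PySem.List.foldl_append_singleton_eq_map (f := fun _ => ([] : List Int))]
    simp only [List.nil_append]
    rw [pv_outer_loop limit _ (fun _ => ([] : List Int))
      (fun x hx => ((PySem.List.mem_pyRange_one).1 hx).1)]
    apply List.map_congr_left
    intro y hy
    have hy2 := (PySem.List.mem_pyRange_one).1 hy
    simp only [List.nil_append]
    exact pv_pointwise limit y (by omega) (by omega)
  have hB : sieve_factors_alt limit = (PySem.List.pyRange 0 limit 1).map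
      (fun y => (PySem.List.pyRange 2 y 1).filter (fun d => PySem.Int.mod y d == 0)) := by
    show (PySem.List.pyRange 0 limit 1).foldl
        (fun out n => out ++ [(pvPairLoop n 2 [] []).1 ++ (pvPairLoop n 2 [] []).2.reverse]) [] = _
    rw [PySem.List.foldl_append_singleton_eq_map]
    simp only [List.nil_append]
    apply List.map_congr_left
    intro y _
    exact pv_row y
  rw [hA, hB]
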